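-- pv_equiv track=rewrite | github.com/maniraja1/Python | proj1/Python-Test1/windows_morsels.py | window6
-- ===== SOURCE A (Python) =====
-- from collections import  deque
-- from itertools import  islice,repeat,chain
--
-- def window6(iterable, n, fill=None):
--     if n == 0:
--         return
--     iterator = iter(iterable)
--     current = deque(islice(iterator, n), maxlen=n)
--     yield tuple(current) + (fill,)*(n-len(current))
--     for item in iterator:
--         current.append(item)
--         yield tuple(current)
-- ===== SOURCE B (Python) =====
-- def window6(iterable, n, fill=None):
--     if n == 0:
--         return
--     if n < 0:
--         raise ValueError("window size must be non-negative")
--     lst = list(iterable)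
--     if len(lst) < n:
--         yield tuple(lst) + (fill,) * (n - len(lst))
--         return
--     for i in range(len(lst) - n + 1):
--         yield tuple(lst[i:i + n])
-- ===== Notes on version B (the rewrite author's own statement) =====
-- stated objective: simpler
-- what changed: B materialises the input into a list once and yields each window as a direct slice lst[i:i+n] by index, instead of A's rolling bounded deque fed one item at a time from an iterator; the short-input padded window becomes one explicit early-return case.
import Mathlib
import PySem

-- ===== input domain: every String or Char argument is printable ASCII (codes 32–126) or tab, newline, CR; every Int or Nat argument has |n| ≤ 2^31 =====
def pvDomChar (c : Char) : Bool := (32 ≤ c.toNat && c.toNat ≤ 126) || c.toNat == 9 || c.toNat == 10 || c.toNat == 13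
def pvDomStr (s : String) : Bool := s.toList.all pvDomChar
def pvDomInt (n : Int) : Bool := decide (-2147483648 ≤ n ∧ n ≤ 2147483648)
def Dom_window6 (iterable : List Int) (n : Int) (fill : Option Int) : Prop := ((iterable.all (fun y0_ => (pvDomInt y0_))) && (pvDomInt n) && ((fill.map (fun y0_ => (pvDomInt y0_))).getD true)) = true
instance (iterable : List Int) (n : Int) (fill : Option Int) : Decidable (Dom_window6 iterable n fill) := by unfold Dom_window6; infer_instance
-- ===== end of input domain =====

-- B materialises the input into a list and yields each window as a direct index slice,
-- instead of A's rolling bounded deque fed from an iterator (objective: simpler).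
-- Both are generators in Python; the ports return the list of all yielded windows.

-- ===== PORT A =====
-- deque append with maxlen = k: drop from the left whatever exceeds k
def pvStepA (k : Nat) (st : List (List (Option Int)) × List (Option Int)) (item : Int) :
    List (List (Option Int)) × List (Option Int) :=
  let cur' := (st.2 ++ [some item]).drop (st.2.length + 1 - k)
  (st.1 ++ [cur'], cur')

def window6 (iterable : List Int) (n : Int) (fill : Option Int) : List (List (Option Int)) :=
  if n = 0 then []
  else
    -- n < 0 raises ValueError in Python (islice/deque); excluded by Pre_window6
    let k := n.toNat
    let current := (iterable.take k).map Option.some   -- deque(islice(iterator, n), maxlen=n)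
    let rest := iterable.drop k                        -- what remains of the iterator
    let first := current ++ List.replicate (k - current.length) fill
    (rest.foldl (pvStepA k) ([first], current)).1

-- ===== PORT B =====
def window6_alt (iterable : List Int) (n : Int) (fill : Option Int) : List (List (Option Int)) :=
  if n = 0 then []
  else
    let k := n.toNat
    if iterable.length < k then
      [iterable.map Option.some ++ List.replicate (k - iterable.length) fill]
    else
      -- lst[i:i+n] with 0 ≤ i, i+n ≤ len: exactly drop i, take n
      (List.range (iterable.length - k + 1)).map
        (fun i => ((iterable.drop i).take k).map Option.some)

-- ===== PRECONDITION & SPEC =====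
-- Pre_ excludes n < 0, on which Python A raises ValueError (islice stop must be ≥ 0).
def Pre_window6 (iterable : List Int) (n : Int) (fill : Option Int) : Prop := 0 ≤ n
instance (iterable : List Int) (n : Int) (fill : Option Int) : Decidable (Pre_window6 iterable n fill) := by unfold Pre_window6; infer_instance
def pvWitness_window6 : List Int × Int × Option Int := ([1, 2, 3], 2, none)

def Spec_window6 (iterable : List Int) (n : Int) (fill : Option Int) (out : List (List (Option Int))) : Prop := out = window6_alt iterable n fill
instance (iterable : List Int) (n : Int) (fill : Option Int) (out : List (List (Option Int))) : Decidable (Spec_window6 iterable n fill out) := by unfold Spec_window6; infer_instance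

-- ===== CLAIM (what is proved, stated in full; the proofs are below) =====
def Claim_equal_window6 : Prop := ∀ (iterable : List Int) (n : Int) (fill : Option Int), Dom_window6 iterable n fill → Pre_window6 iterable n fill → Spec_window6 iterable n fill (window6 iterable n fill)

-- ===== LEMMAS AND PROOFS =====

-- The rolling-deque fold, characterised: each processed item yields the next slice of
-- (cur ++ rest), shifted one further right.
theorem foldA_windows (k : Nat) :
    ∀ (rest : List Int) (acc : List (List (Option Int))) (cur : List (Option Int)),
      cur.length = k →
      (rest.foldl (pvStepA k) (acc, cur)).1
        = acc ++ (List.range rest.length).map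
            (fun j => ((cur ++ rest.map Option.some).drop (j + 1)).take k) := by
  intro rest
  induction rest with
  | nil => intro acc cur h; simp
  | cons x rest ih =>
      intro acc cur h
      have hstep : pvStepA k (acc, cur) x
          = (acc ++ [(cur ++ [some x]).drop 1], (cur ++ [some x]).drop 1) := by
        simp [pvStepA, h]
      have hlen : ((cur ++ [some x]).drop 1).length = k := by
        simp [h]
      have hfull : (cur ++ [some x]).drop 1 ++ rest.map Option.some
          = (cur ++ (x :: rest).map Option.some).drop 1 := by
        cases cur <;> simp
      calc ((x :: rest).foldl (pvStepA k) (acc, cur)).1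
          = (rest.foldl (pvStepA k)
              (acc ++ [(cur ++ [some x]).drop 1], (cur ++ [some x]).drop 1)).1 := by
            rw [List.foldl_cons, hstep]
        _ = (acc ++ [(cur ++ [some x]).drop 1])
              ++ (List.range rest.length).map
                 (fun j => (((cur ++ [some x]).drop 1 ++ rest.map Option.some).drop (j + 1)).take k) := by
            exact ih _ _ hlen
        _ = acc ++ (List.range (x :: rest).length).map
              (fun j => ((cur ++ (x :: rest).map Option.some).drop (j + 1)).take k) := by
            rw [List.length_cons, List.range_succ_eq_map, List.map_cons, List.append_assoc,
              List.singleton_append]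
            congr 1
            congr 1
            · -- head: the first post-initial window
              symm
              rw [← hfull]
              exact List.take_left' hlen
            · rw [List.map_map]
              apply List.map_congr_left
              intro j _
              simp only [Function.comp_apply]
              rw [hfull, List.drop_drop]
              congr 2
              omega

theorem window6_eq (iterable : List Int) (n : Int) (fill : Option Int) (hn : 0 ≤ n) :
    window6 iterable n fill = window6_alt iterable n fill := by
  by_cases h0 : n = 0
  · simp [window6, window6_alt, h0]
  · have hk : 0 < n.toNat := by omega
    unfold window6 window6_alt
    rw [if_neg h0, if_neg h0]
    set k := n.toNat with hkdef
    by_cases hshort : iterable.length < k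
    · -- short input: rest is empty, both yield the single padded window
      have htake : iterable.take k = iterable := List.take_of_length_le (by omega)
      have hdrop : iterable.drop k = [] := List.drop_eq_nil_of_le (by omega)
      rw [if_pos hshort]
      simp [htake, hdrop]
    · rw [if_neg hshort]
      rw [not_lt] at hshort
      have hlcur : ((iterable.take k).map Option.some).length = k := by
        simp [List.length_take]; omega
      rw [foldA_windows k _ _ _ hlcur]
      have hfull : (iterable.take k).map Option.some ++ (iterable.drop k).map Option.some
          = iterable.map Option.some := by
        rw [← List.map_append, List.take_append_drop]
      have hlen : (iterable.drop k).length = iterable.length - k := by simp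
      have hpad : k - ((iterable.take k).map Option.some).length = 0 := by omega
      rw [hfull, hlen, hpad]
      have hm : iterable.length - k + 1 = (iterable.length - k) + 1 := rfl
      rw [hm, List.range_succ_eq_map, List.map_cons, List.map_map]
      simp only [List.replicate_zero, List.append_nil, List.drop_zero, List.singleton_append]
      congr 1
      apply List.map_congr_left
      intro j _
      simp [Function.comp, List.map_take, List.map_drop, Nat.succ_eq_add_one]

-- ===== VERDICT (by name: the statement is the Claim_ definition above) =====
theorem window6_spec : Claim_equal_window6 := by
  intro iterable n fill _ hpre
  unfold Spec_window6
  exact window6_eq iterable n fill hpre
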